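-- pv_equiv track=rewrite | github.com/lovewyy/exam | Notepad++/招行信用卡：RL机器人.py | func
-- ===== SOURCE A (Python) =====
-- def func(stack):
--     res = []
--     n = len(stack)
--     t = 1
--     for i in range(n):
--         if stack[i] == 'L':
--             t = i
--             break
--     count0 = 0
--     count1 = 0
--     for i in range(n):
--         if i % 2 == 0:
--             count0 += 1
--         else:
--             count1 += 1
--
--     for i in range(n):
--         if i == t and t % 2 == 0:
--             res.append(count0)
--         elif i == t and t % 2 == 1:
--             res.append(count1)
--         elif i == t - 1 and t % 2 == 1:
--             res.append(count0)
--         elif i == t - 1 and t % 2 == 0: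
--             res.append(count1)
--         else:
--             res.append(0)
--     return res
-- ===== SOURCE B (Python) =====
-- def func(stack):
--     n = len(stack)
--     count0 = (n + 1) // 2
--     count1 = n // 2
--     try:
--         t = stack.index('L')
--     except ValueError:
--         t = 1
--     res = [0] * n
--     for p in (t - 1, t):
--         if 0 <= p < n:
--             res[p] = count0 if p % 2 == 0 else count1
--     return res
-- ===== Notes on version B (the rewrite author's own statement) =====
-- stated objective: simpler
-- what changed: Replaces A's three index loops (linear search with break, a parity-counting loop, and a per-index five-way branch building res) by closed-form counts (n+1)//2 and n//2, list.index with a default, and two guarded point assignments into [0]*n.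
import Mathlib
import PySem

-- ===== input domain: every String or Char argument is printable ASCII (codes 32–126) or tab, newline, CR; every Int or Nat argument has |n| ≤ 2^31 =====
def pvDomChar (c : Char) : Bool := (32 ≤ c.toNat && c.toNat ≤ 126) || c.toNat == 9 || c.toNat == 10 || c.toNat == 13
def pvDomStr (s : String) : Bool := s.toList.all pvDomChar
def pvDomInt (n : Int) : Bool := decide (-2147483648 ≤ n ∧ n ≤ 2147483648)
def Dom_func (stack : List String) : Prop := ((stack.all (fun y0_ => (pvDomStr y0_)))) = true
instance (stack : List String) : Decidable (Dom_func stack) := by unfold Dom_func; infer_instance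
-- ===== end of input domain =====

-- B replaces A's three index loops by closed-form counts, list.index with a default, and two guarded point assignments (simpler; same O(n) cost).

-- ===== PORT A =====
-- first loop of A: t = 1; for i in range(n): if stack[i] == 'L': t = i; break
def funcFindT : List String → Int → Int
  | [], _ => 1
  | s :: rest, i => if s = "L" then i else funcFindT rest (i + 1)

def func (stack : List String) : List Int :=
  let n : Int := stack.length
  let t : Int := funcFindT stack 0
  let counts :=
    (PySem.List.pyRange 0 n 1).foldl
      (fun (c : Int × Int) i =>
        if PySem.Int.mod i 2 = 0 then (c.1 + 1, c.2) else (c.1, c.2 + 1)) (0, 0)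
  let count0 := counts.1
  let count1 := counts.2
  (PySem.List.pyRange 0 n 1).foldl
    (fun res i =>
      if i = t ∧ PySem.Int.mod t 2 = 0 then res ++ [count0]
      else if i = t ∧ PySem.Int.mod t 2 = 1 then res ++ [count1]
      else if i = t - 1 ∧ PySem.Int.mod t 2 = 1 then res ++ [count0]
      else if i = t - 1 ∧ PySem.Int.mod t 2 = 0 then res ++ [count1]
      else res ++ [0]) []

-- ===== PORT B =====
-- res[p] = v guarded by 0 <= p < len(res)
def funcSetAt (res : List Int) (p : Int) (v : Int) : List Int :=
  if 0 ≤ p ∧ p < (res.length : Int) then res.set p.toNat v else res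

def func_alt (stack : List String) : List Int :=
  let n : Int := stack.length
  let count0 := PySem.Int.floordiv (n + 1) 2
  let count1 := PySem.Int.floordiv n 2
  let t : Int :=
    match PySem.List.index? stack "L" with
    | some i => (i : Int)
    | none => 1
  let res0 := List.replicate stack.length (0 : Int)
  let res1 := funcSetAt res0 (t - 1) (if PySem.Int.mod (t - 1) 2 = 0 then count0 else count1)
  funcSetAt res1 t (if PySem.Int.mod t 2 = 0 then count0 else count1)

-- ===== PRECONDITION & SPEC =====
def Spec_func (stack : List String) (out : List Int) : Prop := out = func_alt stack
instance (stack : List String) (out : List Int) : Decidable (Spec_func stack out) := by unfold Spec_func; infer_instance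

-- ===== CLAIM (what is proved, stated in full; the proofs are below) =====
def Claim_equal_func : Prop := ∀ (stack : List String), Dom_func stack → Spec_func stack (func stack)

-- ===== LEMMAS AND PROOFS =====

-- A's linear search agrees with list.index-with-default
lemma funcFindT_eq (l : List String) (k : Int) :
    funcFindT l k =
      match PySem.List.index? l "L" with
      | some i => k + (i : Int)
      | none => 1 := by
  induction l generalizing k with
  | nil => simp [funcFindT, PySem.List.index?]
  | cons s rest ih =>
    by_cases h : s = "L"
    · subst h
      rw [PySem.List.index?_cons_self]
      simp [funcFindT]
    · rw [PySem.List.index?_cons_of_ne rest h]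
      simp only [funcFindT, if_neg h, ih (k + 1)]
      cases hidx : PySem.List.index? rest "L" with
      | none => simp
      | some i => simp; ring

-- A's counting loop computes the closed forms
lemma counts_eq (n : Nat) :
    (PySem.List.pyRange 0 (n : Int) 1).foldl
      (fun (c : Int × Int) i =>
        if PySem.Int.mod i 2 = 0 then (c.1 + 1, c.2) else (c.1, c.2 + 1)) (0, 0)
    = ((((n + 1) / 2 : Nat) : Int), (((n / 2 : Nat)) : Int)) := by
  induction n with
  | zero => simp
  | succ m ih =>
    rw [show ((m + 1 : Nat) : Int) = (m : Int) + 1 by push_cast; ring,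
      PySem.List.pyRange_one_succ_right (by positivity),
      List.foldl_append, ih]
    simp only [List.foldl_cons, List.foldl_nil]
    rw [PySem.Int.mod_eq_emod_of_pos (by norm_num : (0:Int) < 2)]
    by_cases h : (m : Int) % 2 = 0
    · rw [if_pos h]
      refine Prod.ext ?_ ?_ <;> simp <;> omega
    · rw [if_neg h]
      refine Prod.ext ?_ ?_ <;> simp <;> omega

-- the build loop is a map
lemma foldl_build_eq_map (g : Int → Int) (l : List Int) (init : List Int) :
    l.foldl (fun res i => res ++ [g i]) init = init ++ l.map g := by
  induction l generalizing init with
  | nil => simp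
  | cons x xs ih => simp [ih]

lemma funcSetAt_length (res : List Int) (p v : Int) :
    (funcSetAt res p v).length = res.length := by
  unfold funcSetAt; split <;> simp

-- element of funcSetAt
lemma funcSetAt_getElem (res : List Int) (p v : Int) (i : Nat) (hi : i < res.length)
    (h' : i < (funcSetAt res p v).length) :
    (funcSetAt res p v)[i]'h' = if (i : Int) = p then v else res[i] := by
  by_cases hp : 0 ≤ p ∧ p < (res.length : Int)
  · simp only [funcSetAt, if_pos hp]
    rw [List.getElem_set]
    by_cases h : (i : Int) = p
    · rw [if_pos (by omega), if_pos h]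
    · rw [if_neg (by omega), if_neg h]
  · have hne : (i : Int) ≠ p := by omega
    simp only [funcSetAt, if_neg hp, if_neg hne]

theorem func_eq_alt (stack : List String) : func stack = func_alt stack := by
  have ht : funcFindT stack 0 =
      (match PySem.List.index? stack "L" with
       | some i => (i : Int)
       | none => 1) := by
    rw [funcFindT_eq]
    cases PySem.List.index? stack "L" <;> simp
  simp only [func, func_alt, ← ht, counts_eq stack.length]
  set n : Nat := stack.length with hn
  set t : Int := funcFindT stack 0 with htd
  set c0 : Int := (((n + 1) / 2 : Nat) : Int) with hc0d
  set c1 : Int := ((n / 2 : Nat) : Int) with hc1d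
  have hc0 : PySem.Int.floordiv ((n : Int) + 1) 2 = c0 := by
    rw [PySem.Int.floordiv_eq_ediv_of_pos (by norm_num : (0:Int) < 2), hc0d]; omega
  have hc1 : PySem.Int.floordiv (n : Int) 2 = c1 := by
    rw [PySem.Int.floordiv_eq_ediv_of_pos (by norm_num : (0:Int) < 2), hc1d]; omega
  rw [hc0, hc1]
  have hfun : (fun (res : List Int) (i : Int) =>
      if i = t ∧ PySem.Int.mod t 2 = 0 then res ++ [c0]
      else if i = t ∧ PySem.Int.mod t 2 = 1 then res ++ [c1]
      else if i = t - 1 ∧ PySem.Int.mod t 2 = 1 then res ++ [c0]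
      else if i = t - 1 ∧ PySem.Int.mod t 2 = 0 then res ++ [c1]
      else res ++ [0])
      = (fun res i => res ++ [(fun i =>
      if i = t ∧ PySem.Int.mod t 2 = 0 then c0
      else if i = t ∧ PySem.Int.mod t 2 = 1 then c1
      else if i = t - 1 ∧ PySem.Int.mod t 2 = 1 then c0
      else if i = t - 1 ∧ PySem.Int.mod t 2 = 0 then c1
      else 0) i]) := by
    funext res i; beta_reduce; split_ifs <;> rfl
  rw [hfun, foldl_build_eq_map, List.nil_append]
  apply List.ext_getElem
  · simp [funcSetAt_length, PySem.List.length_pyRange_one]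
  · intro i h1 h2
    have hilen : i < n := by
      simp only [List.length_map, PySem.List.length_pyRange_one] at h1; omega
    have hset1len : i < (funcSetAt (List.replicate n (0 : Int)) (t - 1)
        (if PySem.Int.mod (t - 1) 2 = 0 then c0 else c1)).length := by
      rw [funcSetAt_length]; simpa using hilen
    rw [List.getElem_map, PySem.List.getElem_pyRange_one]
    rw [funcSetAt_getElem _ _ _ i (by rw [funcSetAt_length]; simpa using hilen) h2]
    rw [funcSetAt_getElem _ _ _ i (by simpa using hilen) hset1len]
    rw [List.getElem_replicate]
    rw [PySem.Int.mod_eq_emod_of_pos (a := t) (by norm_num : (0:Int) < 2),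
      PySem.Int.mod_eq_emod_of_pos (a := t - 1) (by norm_num : (0:Int) < 2)]
    rw [zero_add]
    by_cases hit : (i : Int) = t
    · rw [if_pos hit]
      by_cases hpar : t % 2 = 0
      · rw [if_pos hpar, if_pos ⟨hit, hpar⟩]
      · have hpar1 : t % 2 = 1 := by omega
        rw [if_neg hpar, if_neg (by omega), if_pos ⟨hit, hpar1⟩]
    · rw [if_neg hit]
      by_cases hit1 : (i : Int) = t - 1
      · rw [if_pos hit1]
        by_cases hpar : t % 2 = 0
        · have hodd : (t - 1) % 2 ≠ 0 := by omega
          rw [if_neg hodd, if_neg (by omega), if_neg (by omega), if_neg (by omega),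
            if_pos ⟨hit1, hpar⟩]
        · have hpar1 : t % 2 = 1 := by omega
          have heven : (t - 1) % 2 = 0 := by omega
          rw [if_pos heven, if_neg (by omega), if_neg (by omega), if_pos ⟨hit1, hpar1⟩]
      · rw [if_neg hit1, if_neg (by omega), if_neg (by omega), if_neg (by omega), if_neg (by omega)]

-- ===== VERDICT (by name: the statement is the Claim_ definition above) =====
theorem func_spec : Claim_equal_func := by
  intro stack _
  unfold Spec_func
  exact func_eq_alt stack
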